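-- pv_equiv track=rewrite | github.com/dxmv/advent_of_code_2023 | Day 9/Part 1/main.py | generate_result
-- ===== SOURCE A (Python) =====
-- def all_zeroes(arr) -> bool:
--     for n in arr:
--         if n != 0:
--             return False
--     return True
--
-- def generate_result(arr):
--     res_arr = [arr]
--     index = 0  # index for traversing the res_arr
--     while not all_zeroes(res_arr[index]):
--         res_arr.append([])
--         for i in range(1, len(res_arr[index])):
--             res_arr[index + 1].append(
--                 res_arr[index][i] - res_arr[index][i - 1])  # add the elements at i and i-1 'above'
--         index += 1  # now the new row becomes the previous row
--     return res_arr
-- ===== SOURCE B (Python) =====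
-- def generate_result(arr):
--     if not any(arr):          # all zeroes (empty row included)
--         return [arr]
--     diffs = [b - a for a, b in zip(arr, arr[1:])]
--     return [arr] + generate_result(diffs)
-- ===== Notes on version B (the rewrite author's own statement) =====
-- stated objective: simpler
-- what changed: Replaced A's while-loop that appends to and indexes into the growing result list (building each difference row by an indexed inner for-loop) with direct structural recursion on the difference recurrence, computing each row by a zip comprehension over adjacent pairs.
import Mathlib
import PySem

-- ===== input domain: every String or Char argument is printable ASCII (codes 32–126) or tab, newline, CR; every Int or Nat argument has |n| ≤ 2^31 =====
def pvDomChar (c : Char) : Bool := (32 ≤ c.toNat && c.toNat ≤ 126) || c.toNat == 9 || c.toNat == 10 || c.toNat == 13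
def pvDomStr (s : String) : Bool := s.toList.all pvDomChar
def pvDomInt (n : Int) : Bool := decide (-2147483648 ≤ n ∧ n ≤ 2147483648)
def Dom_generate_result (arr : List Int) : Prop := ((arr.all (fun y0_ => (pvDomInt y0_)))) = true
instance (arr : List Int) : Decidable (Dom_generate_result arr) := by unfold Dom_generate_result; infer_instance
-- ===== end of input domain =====

-- B replaces A's while-loop + manual index into the growing result list by direct
-- structural recursion on the difference recurrence (objective: simpler).

-- ===== PORT A =====
-- helper all_zeroes: loop with early return False
def all_zeroes : List Int → Bool
  | [] => true
  | n :: rest => if n ≠ 0 then false else all_zeroes rest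

-- inner for-loop of A: for i in range(1, len(row)): append row[i] - row[i-1]
def pvDiffRowA (row : List Int) : List Int :=
  (PySem.List.pyRange 1 (row.length : Int)).foldl
    (fun acc i => acc ++ [PySem.List.pyGetD row i 0 - PySem.List.pyGetD row (i - 1) 0]) []

theorem pvDiffRowA_length_lt (row : List Int) (h : row ≠ []) :
    (pvDiffRowA row).length < row.length := by
  unfold pvDiffRowA
  rw [PySem.List.foldl_append_singleton_eq_map, PySem.List.pyRange_of_pos 1 (row.length : Int) (by omega)]
  have hl : 0 < row.length := List.length_pos_iff.mpr h
  simp only [List.nil_append, List.length_map, List.length_range]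
  split_ifs with h1 <;> omega

-- A's while loop: state = the row res_arr[index] currently examined, plus the rows built so far
def pvGenLoopA (row : List Int) (acc : List (List Int)) : List (List Int) :=
  if all_zeroes row then acc
  else
    let nr := pvDiffRowA row
    pvGenLoopA nr (acc ++ [nr])
termination_by row.length
decreasing_by
  have hne : row ≠ [] := by rintro rfl; simp [all_zeroes] at *
  exact pvDiffRowA_length_lt row hne

def generate_result (arr : List Int) : List (List Int) :=
  pvGenLoopA arr [arr]

-- ===== PORT B =====
def generate_result_alt (arr : List Int) : List (List Int) :=
  if !(arr.any (· != 0)) then [arr]       -- not any(arr)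
  else
    -- [b - a for a, b in zip(arr, arr[1:])]
    let diffs := (arr.zip (PySem.List.slice arr (some 1) none)).map (fun p => p.2 - p.1)
    arr :: generate_result_alt diffs
termination_by arr.length
decreasing_by
  simp only [Bool.not_eq_eq_eq_not, Bool.not_true, List.any_eq_false] at *
  have hne : arr ≠ [] := by
    rename_i h
    rintro rfl; simp at h
  have hl : 0 < arr.length := List.length_pos_iff.mpr hne
  simp [PySem.List.slice_from_one]
  omega

-- ===== PRECONDITION & SPEC =====
def Spec_generate_result (arr : List Int) (out : List (List Int)) : Prop := out = generate_result_alt arr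
instance (arr : List Int) (out : List (List Int)) : Decidable (Spec_generate_result arr out) := by unfold Spec_generate_result; infer_instance

-- ===== CLAIM (what is proved, stated in full; the proofs are below) =====
def Claim_equal_generate_result : Prop := ∀ (arr : List Int), Dom_generate_result arr → Spec_generate_result arr (generate_result arr)

-- ===== LEMMAS AND PROOFS =====

theorem all_zeroes_iff (row : List Int) : all_zeroes row = !(row.any (· != 0)) := by
  induction row with
  | nil => simp [all_zeroes]
  | cons a rest ih =>
    simp only [all_zeroes, ih, List.any_cons]
    by_cases h : a = 0 <;> simp [h]

-- A's inner loop equals B's zip-comprehension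
theorem pvNatDiffMap (row : List Int) :
    (List.range (row.length - 1)).map (fun k => row.getD (k+1) 0 - row.getD k 0)
      = (row.zip row.tail).map (fun p => p.2 - p.1) := by
  induction row with
  | nil => simp
  | cons a rest ih =>
    cases rest with
    | nil => simp
    | cons b rest' =>
      simp only [List.length_cons, Nat.add_sub_cancel, List.range_succ_eq_map, List.map_cons,
        List.map_map, List.tail_cons, List.zip_cons_cons]
      refine List.cons_eq_cons.mpr ⟨by simp, ?_⟩
      simp only [List.getD_cons_succ]
      simpa [List.length_cons, Nat.add_sub_cancel, List.tail_cons] using ih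

theorem pvDiffRowA_eq (row : List Int) :
    pvDiffRowA row = (row.zip (PySem.List.slice row (some 1) none)).map (fun p => p.2 - p.1) := by
  unfold pvDiffRowA
  rw [PySem.List.foldl_append_singleton_eq_map, PySem.List.pyRange_of_pos 1 (row.length : Int) (by omega),
    PySem.List.slice_from_one, List.map_map, List.nil_append]
  have hif : (if (1:Int) < (row.length : Int) then (((row.length : Int) - 1 + 1 - 1) / 1).toNat else 0)
      = row.length - 1 := by split_ifs with h1 <;> omega
  rw [hif, ← pvNatDiffMap]
  apply List.map_congr_left
  intro k _
  simp only [Function.comp]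
  have e1 : (1:Int) + 1 * (k:Int) = ((k + 1 : Nat) : Int) := by push_cast; ring
  have e2 : ((k + 1 : Nat) : Int) - 1 = ((k : Nat) : Int) := by push_cast; ring
  rw [e1, e2, PySem.List.pyGetD_natCast, PySem.List.pyGetD_natCast]

theorem alt_head (arr : List Int) : generate_result_alt arr = arr :: (generate_result_alt arr).drop 1 := by
  rw [generate_result_alt]
  split_ifs <;> simp

theorem genLoopA_eq (n : Nat) : ∀ (row : List Int), row.length ≤ n → ∀ (acc : List (List Int)),
    pvGenLoopA row acc = acc ++ (generate_result_alt row).drop 1 := by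
  induction n with
  | zero =>
    intro row hlen acc
    have : row = [] := by cases row <;> simp_all
    subst this
    rw [pvGenLoopA, generate_result_alt]
    simp [all_zeroes]
  | succ n ih =>
    intro row hlen acc
    rw [pvGenLoopA, generate_result_alt, all_zeroes_iff]
    by_cases hz : (row.any (· != 0)) = false
    · simp [hz]
    · simp only [Bool.not_eq_false] at hz
      simp only [hz, Bool.not_true, Bool.false_eq_true, if_false, List.drop_succ_cons,
        List.drop_zero]
      have hne : row ≠ [] := by rintro rfl; simp at hz
      rw [pvDiffRowA_eq]
      set nr := (row.zip (PySem.List.slice row (some 1) none)).map (fun p => p.2 - p.1) with hnr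
      have hlt : nr.length < row.length := by
        rw [hnr, ← pvDiffRowA_eq]
        exact pvDiffRowA_length_lt row hne
      rw [ih nr (by omega) (acc ++ [nr]), List.append_assoc]
      congr 1
      exact (alt_head nr).symm

-- ===== VERDICT (by name: the statement is the Claim_ definition above) =====
theorem generate_result_spec : Claim_equal_generate_result := by
  intro arr _
  unfold Spec_generate_result generate_result
  rw [genLoopA_eq arr.length arr le_rfl [arr]]
  exact (alt_head arr).symm
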